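-- pv_equiv track=rewrite | github.com/rajakarthik-genai/backendtest | src/utils/patient_id.py | validate_patient_id_format
-- ===== SOURCE A (Python) =====
-- import string
--
-- def validate_patient_id_format(patient_id: str) -> bool:
--     """
--     Validate that a patient ID follows the expected format.
--
--     Args:
--         patient_id: Patient ID to validate
--
--     Returns:
--         True if valid format, False otherwise
--     """
--     if not patient_id:
--         return False
--
--     # Expected format: PT_<16_hex_chars>
--     if not patient_id.startswith("PT_"):
--         return False
--
--     if len(patient_id) != 19:  # PT_ + 16 chars
--         return False
--
--     hex_part = patient_id[3:]
--     return all(c in string.hexdigits.upper() for c in hex_part)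
-- ===== SOURCE B (Python) =====
-- import re
--
-- _PATIENT_ID_RE = re.compile(r"PT_[0-9A-F]{16}")
--
-- def validate_patient_id_format(patient_id: str) -> bool:
--     """
--     Validate that a patient ID follows the expected format.
--
--     Args:
--         patient_id: Patient ID to validate
--
--     Returns:
--         True if valid format, False otherwise
--     """
--     if not patient_id:
--         return False
--     return _PATIENT_ID_RE.fullmatch(patient_id) is not None
-- ===== Notes on version B (the rewrite author's own statement) =====
-- stated objective: idiomatic
-- what changed: Replaces the prefix/length guards and the per-character generator over string.hexdigits.upper() with a single precompiled re.fullmatch against the anchored pattern PT_[0-9A-F]{16} (the empty-input guard stays).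
import Mathlib
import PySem

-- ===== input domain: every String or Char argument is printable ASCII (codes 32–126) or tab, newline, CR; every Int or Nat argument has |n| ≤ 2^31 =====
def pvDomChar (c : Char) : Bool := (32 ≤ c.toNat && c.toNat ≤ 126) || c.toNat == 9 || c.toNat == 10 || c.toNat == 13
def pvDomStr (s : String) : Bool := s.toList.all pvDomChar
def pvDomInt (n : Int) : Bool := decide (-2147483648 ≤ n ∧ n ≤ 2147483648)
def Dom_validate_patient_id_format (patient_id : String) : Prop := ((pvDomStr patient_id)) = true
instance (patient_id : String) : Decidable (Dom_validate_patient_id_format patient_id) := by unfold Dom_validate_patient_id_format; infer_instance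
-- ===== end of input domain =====

-- B replaces A's guard chain and per-char generator with one anchored regex fullmatch (objective: idiomatic).
-- ===== PORT A =====
-- string.hexdigits.upper()
def pvHexdigitsUpper : List Char := "0123456789ABCDEFABCDEF".toList

def validate_patient_id_format (patient_id : String) : Bool :=
  if patient_id.toList.isEmpty then false            -- if not patient_id
  else if ! PySem.Chars.startswith patient_id.toList "PT_".toList then false
  else if PySem.Chars.len patient_id.toList ≠ 19 then false
  else
    -- hex_part = patient_id[3:]; all(c in string.hexdigits.upper() for c in hex_part)
    -- ('c in str' for a single char c is exactly membership in the string's chars)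
    (PySem.Chars.slice patient_id.toList (some 3) none).all (fun c => pvHexdigitsUpper.contains c)

-- ===== PORT B =====
-- hand-port of re.fullmatch(r"PT_[0-9A-F]{16}", s): the anchored pattern matches exactly the
-- strings 'P'::'T'::'_'::rest with rest 16 chars from the class [0-9A-F] (exact: no regex lib in Lean)
def pvHexClass : List Char := "0123456789ABCDEF".toList

def validate_patient_id_format_alt (patient_id : String) : Bool :=
  if patient_id.toList.isEmpty then false            -- if not patient_id
  else
    match patient_id.toList with
    | 'P' :: 'T' :: '_' :: rest => rest.length == 16 && rest.all (fun c => pvHexClass.contains c)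
    | _ => false
-- ===== PRECONDITION & SPEC =====
def Spec_validate_patient_id_format (patient_id : String) (out : Bool) : Prop := out = validate_patient_id_format_alt patient_id
instance (patient_id : String) (out : Bool) : Decidable (Spec_validate_patient_id_format patient_id out) := by unfold Spec_validate_patient_id_format; infer_instance

-- ===== CLAIM (what is proved, stated in full; the proofs are below) =====
def Claim_equal_validate_patient_id_format : Prop := ∀ (patient_id : String), Dom_validate_patient_id_format patient_id → Spec_validate_patient_id_format patient_id (validate_patient_id_format patient_id)

-- ===== LEMMAS AND PROOFS =====
-- The 22-char string string.hexdigits.upper() and the regex class [0-9A-F] admit the same characters.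
theorem pv_hex_mem (c : Char) : c ∈ pvHexdigitsUpper ↔ c ∈ pvHexClass := by
  simp [pvHexdigitsUpper, pvHexClass]
  tauto

theorem pv_main (s : String) :
    validate_patient_id_format s = validate_patient_id_format_alt s := by
  unfold validate_patient_id_format validate_patient_id_format_alt
  cases h : s.toList with
  | nil => simp
  | cons a t =>
    simp only [List.isEmpty_cons, Bool.false_eq_true, if_false]
    split
    · -- A: prefix check failed; B's pattern branch would contradict it
      rename_i hsw
      split
      · rename_i rest heq
        rw [heq] at hsw
        simp [PySem.Chars.startswith, List.isPrefixOf] at hsw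
      · rfl
    · rename_i hsw
      split
      · -- A: length ≠ 19; B's pattern branch forces rest.length ≠ 16
        rename_i hlen
        split
        · rename_i rest heq
          rw [heq] at hlen
          simp [PySem.Chars.len] at hlen
          have : rest.length ≠ 16 := by omega
          simp [this]
        · rfl
      · -- A: prefix ok and length 19; B must take the pattern branch
        rename_i hlen
        split
        · rename_i rest heq
          rw [heq] at hlen ⊢
          simp only [PySem.Chars.len_eq, List.length_cons] at hlen
          have h16 : rest.length = 16 := by omega
          simp [PySem.Chars.slice, PySem.List.slice, h16, pv_hex_mem,
            List.take_of_length_le h16.le]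
        · rename_i hno
          exfalso
          simp only [Bool.not_eq_true, Bool.not_eq_false'] at hsw
          obtain ⟨r, hr⟩ := (PySem.Chars.startswith_iff _ _).mp hsw
          exact hno r (by rw [← hr]; rfl)

-- ===== VERDICT (by name: the statement is the Claim_ definition above) =====
theorem validate_patient_id_format_spec : Claim_equal_validate_patient_id_format := by
  intro s _
  unfold Spec_validate_patient_id_format
  exact pv_main s
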